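-- pv_equiv track=rewrite | github.com/amshrestha2020/CodeSignal | CodeSignal/Graphs/GreatRenaming.py | solution
-- ===== SOURCE A (Python) =====
-- def solution(roadRegister):
--     # Initialize the updated road register with the same size as the original
--     updated_roadRegister = [[False]*len(roadRegister) for _ in range(len(roadRegister))]
--
--     # Iterate over each city
--     for i in range(len(roadRegister)):
--         # Calculate the new name of the city
--         new_name = (i + 1) % len(roadRegister)
--
--         # Update the roads in the updated road register
--         for j in range(len(roadRegister)):
--             if roadRegister[i][j]:
--                 updated_roadRegister[new_name][(j + 1) % len(roadRegister)] = True
--                 updated_roadRegister[(j + 1) % len(roadRegister)][new_name] = True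
--
--     return updated_roadRegister
-- ===== SOURCE B (Python) =====
-- def solution(roadRegister):
--     n = len(roadRegister)
--     return [[bool(roadRegister[(a + n - 1) % n][(b + n - 1) % n]
--                   or roadRegister[(b + n - 1) % n][(a + n - 1) % n])
--              for b in range(n)] for a in range(n)]
-- ===== Notes on version B (the rewrite author's own statement) =====
-- stated objective: simpler
-- what changed: B gathers each output cell directly with the inverse shift (a+n-1)%n as an explicit OR of two input cells in a nested comprehension, instead of A's scatter loop that allocates a False matrix and writes two symmetric positions per truthy input entry.
import Mathlib
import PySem

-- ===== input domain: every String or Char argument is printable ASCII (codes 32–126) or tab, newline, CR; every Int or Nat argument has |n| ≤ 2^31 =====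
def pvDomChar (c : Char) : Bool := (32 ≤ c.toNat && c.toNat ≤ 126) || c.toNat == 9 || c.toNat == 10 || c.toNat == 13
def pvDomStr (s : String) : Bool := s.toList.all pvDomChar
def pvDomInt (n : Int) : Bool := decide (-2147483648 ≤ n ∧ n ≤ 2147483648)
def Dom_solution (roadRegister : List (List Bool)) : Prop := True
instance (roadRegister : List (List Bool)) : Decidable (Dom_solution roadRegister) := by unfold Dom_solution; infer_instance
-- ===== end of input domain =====

-- B gathers each output cell directly with the inverse shift (a+n-1)%n as an OR of two input
-- cells, instead of A's scatter loop writing two symmetric positions per truthy entry (simpler).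

-- ===== PORT A =====
-- reading roadRegister[i][j]; under Pre_ the indices used are always in range
def pvRead (rr : List (List Bool)) (i j : Nat) : Bool := (rr.getD i []).getD j false
-- 'updated[p][q] = True'
def pvSet (m : List (List Bool)) (p q : Nat) : List (List Bool) :=
  m.modify p (fun row => row.set q true)
-- body of A's inner loop over j (new_name = (i+1)%n inlined)
def pvStepJ (rr : List (List Bool)) (n i : Nat) (upd : List (List Bool)) (j : Nat) : List (List Bool) :=
  if pvRead rr i j then pvSet (pvSet upd ((i+1)%n) ((j+1)%n)) ((j+1)%n) ((i+1)%n) else upd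
-- body of A's outer loop over i
def pvStepI (rr : List (List Bool)) (n : Nat) (upd : List (List Bool)) (i : Nat) : List (List Bool) :=
  (List.range n).foldl (pvStepJ rr n i) upd

def solution (roadRegister : List (List Bool)) : List (List Bool) :=
  let n := roadRegister.length
  (List.range n).foldl (pvStepI roadRegister n)
    (List.replicate n (List.replicate n false))

-- ===== PORT B =====
def solution_alt (roadRegister : List (List Bool)) : List (List Bool) :=
  let n := roadRegister.length
  (List.range n).map (fun a => (List.range n).map (fun b =>
    pvRead roadRegister ((a + n - 1) % n) ((b + n - 1) % n)
      || pvRead roadRegister ((b + n - 1) % n) ((a + n - 1) % n)))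

-- ===== PRECONDITION & SPEC =====
-- Pre_ excludes exactly the ragged inputs having a row shorter than the matrix: there
-- Python A raises IndexError on roadRegister[i][j] (B raises as well).
def Pre_solution (roadRegister : List (List Bool)) : Prop :=
  ∀ row ∈ roadRegister, roadRegister.length ≤ row.length
instance (roadRegister : List (List Bool)) : Decidable (Pre_solution roadRegister) := by
  unfold Pre_solution; infer_instance
def pvWitness_solution : List (List Bool) := [[true, false], [false, false]]

def Spec_solution (roadRegister : List (List Bool)) (out : List (List Bool)) : Prop := out = solution_alt roadRegister
instance (roadRegister : List (List Bool)) (out : List (List Bool)) : Decidable (Spec_solution roadRegister out) := by unfold Spec_solution; infer_instance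

-- ===== CLAIM (what is proved, stated in full; the proofs are below) =====
def Claim_equal_solution : Prop := ∀ (roadRegister : List (List Bool)), Dom_solution roadRegister → Pre_solution roadRegister → Spec_solution roadRegister (solution roadRegister)

-- ===== LEMMAS AND PROOFS =====

def pvShape (n : Nat) (m : List (List Bool)) : Prop :=
  m.length = n ∧ ∀ (k : Nat) (h : k < m.length), (m[k]'h).length = n

def pvCell (m : List (List Bool)) (a b : Nat) : Bool := (m.getD a []).getD b false

def pvHit (n i j a b : Nat) : Bool :=
  (((i+1)%n == a) && ((j+1)%n == b)) || (((j+1)%n == a) && ((i+1)%n == b))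

theorem pvShape_set {n : Nat} {m : List (List Bool)} (hm : pvShape n m) (p q : Nat) :
    pvShape n (pvSet m p q) := by
  obtain ⟨h1, h2⟩ := hm
  refine ⟨by simpa [pvSet] using h1, ?_⟩
  intro k hk
  have hk' : k < m.length := by simpa [pvSet] using hk
  simp only [pvSet, List.getElem_modify]
  split_ifs with h
  · simpa using h2 k hk'
  · exact h2 k hk' 

theorem pvCell_set {n : Nat} {m : List (List Bool)} (hm : pvShape n m)
    {p q a b : Nat} (hp : p < n) (hq : q < n) (ha : a < n) (hb : b < n) :
    pvCell (pvSet m p q) a b = if a = p ∧ b = q then true else pvCell m a b := by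
  obtain ⟨hlen, hrows⟩ := hm
  have ha' : a < m.length := by omega
  have hma : a < (m.modify p (fun row => row.set q true)).length := by
    simpa using ha'
  have hrow : (m[a]'ha').length = n := hrows a ha'
  unfold pvCell pvSet
  simp only [List.getD_eq_getElem?_getD]
  rw [List.getElem?_eq_getElem hma, Option.getD_some, List.getElem_modify,
    List.getElem?_eq_getElem ha', Option.getD_some]
  by_cases hap : p = a
  · rw [if_pos hap, List.getElem?_set]
    by_cases hbq : q = b
    · rw [if_pos hbq, if_pos (by omega), if_pos ⟨hap.symm, hbq.symm⟩]
      simp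
    · rw [if_neg hbq, if_neg (by tauto)]
  · rw [if_neg hap, if_neg (by tauto)]

theorem pvShape_stepJ {n : Nat} {m : List (List Bool)} (hm : pvShape n m)
    (rr : List (List Bool)) (i j : Nat) : pvShape n (pvStepJ rr n i m j) := by
  unfold pvStepJ
  split_ifs
  · exact pvShape_set (pvShape_set hm _ _) _ _
  · exact hm

theorem pvCell_stepJ {n : Nat} {m : List (List Bool)} (hm : pvShape n m)
    (hn : 0 < n) (rr : List (List Bool)) (i j : Nat) {a b : Nat} (ha : a < n) (hb : b < n) :
    pvCell (pvStepJ rr n i m j) a b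
      = (pvCell m a b || (pvRead rr i j && pvHit n i j a b)) := by
  unfold pvStepJ
  by_cases hr : pvRead rr i j
  · rw [if_pos hr, hr, Bool.true_and,
      pvCell_set (pvShape_set hm _ _) (Nat.mod_lt _ hn) (Nat.mod_lt _ hn) ha hb,
      pvCell_set hm (Nat.mod_lt _ hn) (Nat.mod_lt _ hn) ha hb]
    split_ifs with hA hB
    · simp [pvHit, hA.1, hA.2]
    · simp [pvHit, hB.1, hB.2]
    · have : pvHit n i j a b = false := by
        simp only [pvHit, Bool.or_eq_false_iff, Bool.and_eq_false_iff,
          beq_eq_false_iff_ne, ne_eq]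
        constructor
        · by_cases h1 : (i + 1) % n = a
          · right; intro h2; exact hB ⟨h1.symm, h2.symm⟩
          · left; exact h1
        · by_cases h1 : (j + 1) % n = a
          · right; intro h2; exact hA ⟨h1.symm, h2.symm⟩
          · left; exact h1
      simp [this]
  · rw [if_neg hr]
    simp only [Bool.not_eq_true] at hr
    simp [hr]

theorem pvShape_foldJ {n : Nat} (rr : List (List Bool)) (i : Nat) (l : List Nat)
    {m : List (List Bool)} (hm : pvShape n m) :
    pvShape n (l.foldl (pvStepJ rr n i) m) := by
  induction l generalizing m with
  | nil => exact hm
  | cons x xs ih => exact ih (pvShape_stepJ hm rr i x)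

theorem pvCell_foldJ {n : Nat} (hn : 0 < n) (rr : List (List Bool)) (i : Nat) (l : List Nat)
    {m : List (List Bool)} (hm : pvShape n m) {a b : Nat} (ha : a < n) (hb : b < n) :
    pvCell (l.foldl (pvStepJ rr n i) m) a b
      = (pvCell m a b || l.any (fun j => pvRead rr i j && pvHit n i j a b)) := by
  induction l generalizing m with
  | nil => simp
  | cons x xs ih =>
      simp only [List.foldl_cons, List.any_cons]
      rw [ih (pvShape_stepJ hm rr i x), pvCell_stepJ hm hn rr i x ha hb,
        Bool.or_assoc]

theorem pvShape_foldI {n : Nat} (rr : List (List Bool)) (l : List Nat)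
    {m : List (List Bool)} (hm : pvShape n m) :
    pvShape n (l.foldl (pvStepI rr n) m) := by
  induction l generalizing m with
  | nil => exact hm
  | cons x xs ih => exact ih (pvShape_foldJ rr x _ hm)

theorem pvCell_foldI {n : Nat} (hn : 0 < n) (rr : List (List Bool)) (l : List Nat)
    {m : List (List Bool)} (hm : pvShape n m) {a b : Nat} (ha : a < n) (hb : b < n) :
    pvCell (l.foldl (pvStepI rr n) m) a b
      = (pvCell m a b ||
          l.any (fun i => (List.range n).any (fun j => pvRead rr i j && pvHit n i j a b))) := by
  induction l generalizing m with
  | nil => simp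
  | cons x xs ih =>
      simp only [List.foldl_cons, List.any_cons, pvStepI]
      rw [ih (pvShape_foldJ rr x _ hm), pvCell_foldJ hn rr x _ hm ha hb, Bool.or_assoc]

-- the shift i ↦ (i+1)%n is inverted by a ↦ (a+n-1)%n on [0,n)
theorem pvMod_inv {n i a : Nat} (hi : i < n) (ha : a < n) :
    (i + 1) % n = a ↔ i = (a + n - 1) % n := by
  have hn : 0 < n := by omega
  rcases Nat.lt_or_ge (i + 1) n with h | h
  · rw [Nat.mod_eq_of_lt h]
    rcases Nat.eq_zero_or_pos a with rfl | hpos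
    · rw [Nat.mod_eq_of_lt (show 0 + n - 1 < n by omega)]
      omega
    · rw [show a + n - 1 = (a - 1) + n by omega, Nat.add_mod_right,
        Nat.mod_eq_of_lt (by omega)]
      omega
  · have hin : i + 1 = n := by omega
    rw [hin, Nat.mod_self]
    rcases Nat.eq_zero_or_pos a with rfl | hpos
    · rw [Nat.mod_eq_of_lt (show 0 + n - 1 < n by omega)]
      omega
    · rw [show a + n - 1 = (a - 1) + n by omega, Nat.add_mod_right,
        Nat.mod_eq_of_lt (by omega)]
      omega

theorem pvAny_eq_gather {n : Nat} (hn : 0 < n) (rr : List (List Bool))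
    {a b : Nat} (ha : a < n) (hb : b < n) :
    (List.range n).any
        (fun i => (List.range n).any (fun j => pvRead rr i j && pvHit n i j a b))
      = (pvRead rr ((a + n - 1) % n) ((b + n - 1) % n)
          || pvRead rr ((b + n - 1) % n) ((a + n - 1) % n)) := by
  have ha' : (a + n - 1) % n < n := Nat.mod_lt _ hn
  have hb' : (b + n - 1) % n < n := Nat.mod_lt _ hn
  have haa : ((a + n - 1) % n + 1) % n = a := (pvMod_inv ha' ha).mpr rfl
  have hbb : ((b + n - 1) % n + 1) % n = b := (pvMod_inv hb' hb).mpr rfl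
  apply Bool.eq_iff_iff.mpr
  simp only [List.any_eq_true, List.mem_range, Bool.and_eq_true, Bool.or_eq_true,
    pvHit, beq_iff_eq]
  constructor
  · rintro ⟨i, hi, j, hj, hr, ⟨h1, h2⟩ | ⟨h1, h2⟩⟩
    · left
      rw [(pvMod_inv hi ha).mp h1, (pvMod_inv hj hb).mp h2] at hr
      exact hr
    · right
      rw [(pvMod_inv hi hb).mp h2, (pvMod_inv hj ha).mp h1] at hr
      exact hr
  · rintro (hr | hr)
    · exact ⟨_, ha', _, hb', hr, Or.inl ⟨haa, hbb⟩⟩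
    · exact ⟨_, hb', _, ha', hr, Or.inr ⟨haa, hbb⟩⟩

theorem pvMain (rr : List (List Bool)) (n : Nat) (hgen : rr.length = n) :
    (List.range n).foldl (pvStepI rr n) (List.replicate n (List.replicate n false))
      = (List.range n).map (fun a => (List.range n).map (fun b =>
          pvRead rr ((a + n - 1) % n) ((b + n - 1) % n)
            || pvRead rr ((b + n - 1) % n) ((a + n - 1) % n))) := by
  have hshape0 : pvShape n (List.replicate n (List.replicate n false)) := by
    refine ⟨by simp, ?_⟩
    intro k hk
    simp
  have hshape := pvShape_foldI rr (List.range n) hshape0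
  rcases Nat.eq_zero_or_pos n with h0 | hpos
  · subst h0
    simp
  apply List.ext_getElem
  · simp [hshape.1]
  · intro a h1 h2
    have ha : a < n := by simpa [hshape.1] using h1
    apply List.ext_getElem
    · simp [hshape.2 a h1]
    · intro b hb1 hb2
      have hb : b < n := by
        have := hb2
        simp only [List.getElem_map, List.getElem_range, List.length_map,
          List.length_range] at this
        exact this
      have hcell : pvCell ((List.range n).foldl (pvStepI rr n)
          (List.replicate n (List.replicate n false))) a b
          = (pvRead rr ((a + n - 1) % n) ((b + n - 1) % n)
              || pvRead rr ((b + n - 1) % n) ((a + n - 1) % n)) := by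
        rw [pvCell_foldI hpos rr _ hshape0 ha hb, pvAny_eq_gather hpos rr ha hb]
        have hz : pvCell (List.replicate n (List.replicate n false)) a b = false := by
          simp [pvCell, List.getD_eq_getElem?_getD, ha, hb]
        rw [hz, Bool.false_or]
      have hget : pvCell ((List.range n).foldl (pvStepI rr n)
          (List.replicate n (List.replicate n false))) a b
          = (((List.range n).foldl (pvStepI rr n)
              (List.replicate n (List.replicate n false)))[a]'h1)[b]'hb1 := by
        simp [pvCell, List.getD_eq_getElem?_getD, List.getElem?_eq_getElem h1,
          List.getElem?_eq_getElem hb1]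
      simp only [List.getElem_map, List.getElem_range]
      rw [← hget, hcell]

-- ===== VERDICT (by name: the statement is the Claim_ definition above) =====
theorem solution_spec : Claim_equal_solution := by
  intro rr _ _
  show solution rr = solution_alt rr
  unfold solution solution_alt
  exact pvMain rr rr.length rfl
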